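-- pv_equiv track=rewrite | github.com/methamphetaminelab/ShellCrawler | dungeonGenerator.py | generateClearDungeon
-- ===== SOURCE A (Python) =====
-- def generateClearDungeon(width, height):
--     dungeon = [["." for _ in range(width)] for _ in range(height)]
--
--     top = "╔" + "═" * width + "╗"
--     bot = "╚" + "═" * width + "╝"
--     dungeon.insert(0, list(top))
--     dungeon.append(list(bot))
--
--     for row in dungeon[1:-1]:
--         row.insert(0, "║")
--         row.append("║")
--
--     return dungeon
-- ===== SOURCE B (Python) =====
-- def generateClearDungeon(width, height):
--     w, h = max(width, 0), max(height, 0)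
--     # 3x3 classification table: row kind (top/middle/bottom) x column kind (left/inner/right)
--     tbl = [["\u2554", "\u2550", "\u2557"],
--            ["\u2551", ".",      "\u2551"],
--            ["\u255a", "\u2550", "\u255d"]]
--     ck = [0] + [1] * w + [2]          # column kinds
--     rk = [0] + [1] * h + [2]          # row kinds
--     proto = [[tbl[i][j] for j in ck] for i in range(3)]   # one prototype row per row kind
--     return [list(proto[i]) for i in rk]
-- ===== Notes on version B (the rewrite author's own statement) =====
-- stated objective: alternative
-- what changed: B classifies coordinates instead of building-and-mutating: a 3x3 character table indexed by row/column kind (border/interior) yields three prototype rows, and the output is kind-list-driven copies of those prototypes, with no inner dot matrix and no insert/append border patching.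
import Mathlib
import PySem

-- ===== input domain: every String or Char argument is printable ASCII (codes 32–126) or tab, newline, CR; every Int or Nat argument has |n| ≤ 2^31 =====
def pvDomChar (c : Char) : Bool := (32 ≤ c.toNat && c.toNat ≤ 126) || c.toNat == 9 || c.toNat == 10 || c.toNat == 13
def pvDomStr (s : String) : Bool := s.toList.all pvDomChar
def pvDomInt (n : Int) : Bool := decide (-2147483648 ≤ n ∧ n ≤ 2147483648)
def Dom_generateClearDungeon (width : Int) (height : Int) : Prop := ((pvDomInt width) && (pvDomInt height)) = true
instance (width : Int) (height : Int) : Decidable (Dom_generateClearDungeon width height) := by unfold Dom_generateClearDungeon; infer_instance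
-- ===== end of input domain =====

-- B classifies coordinates: a 3x3 table by row/column kind yields three prototype rows and
-- the output is kind-driven copies of them, instead of building an inner dot matrix and
-- mutating borders into it; same asymptotic cost, different decomposition.

-- ===== PORT A =====
-- row.insert(0,"║"); row.append("║") applied to one middle row
def pvFrameRow (r : List String) : List String := "║" :: (r ++ ["║"])

-- 'for row in dungeon[1:-1]': frame every element except the last
def pvFrameInner : List (List String) → List (List String)
  | [] => []
  | [x] => [x]
  | x :: y :: xs => pvFrameRow x :: pvFrameInner (y :: xs)

def generateClearDungeon (width : Int) (height : Int) : List (List String) :=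
  -- [["." for _ in range(width)] for _ in range(height)]; range(n) is empty for n ≤ 0, so toNat is exact
  let inner := List.replicate height.toNat (List.replicate width.toNat ".")
  -- list("╔" + "═"*width + "╗") etc.; "s"*n is empty for n ≤ 0
  let top := "╔" :: (List.replicate width.toNat "═" ++ ["╗"])
  let bot := "╚" :: (List.replicate width.toNat "═" ++ ["╝"])
  let dungeon := top :: (inner ++ [bot])
  match dungeon with
  | [] => []
  | t :: rest => t :: pvFrameInner rest

-- ===== PORT B =====
-- 3x3 classification table of Source B: row kind x column kind -> character
def pvTbl : List (List String) :=
  [["╔", "═", "╗"],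
   ["║", ".", "║"],
   ["╚", "═", "╝"]]

def generateClearDungeon_alt (width : Int) (height : Int) : List (List String) :=
  -- max(width,0) is width.toNat; [0]+[1]*w+[2] are the column/row kind lists
  let w := width.toNat
  let h := height.toNat
  let ck : List Nat := 0 :: List.replicate w 1 ++ [2]
  let rk : List Nat := 0 :: List.replicate h 1 ++ [2]
  let proto := (List.range 3).map (fun i => ck.map (fun j => (pvTbl.getD i []).getD j "?"))
  rk.map (fun i => proto.getD i [])

-- ===== PRECONDITION & SPEC =====
def Spec_generateClearDungeon (width : Int) (height : Int) (out : List (List String)) : Prop := out = generateClearDungeon_alt width height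
instance (width : Int) (height : Int) (out : List (List String)) : Decidable (Spec_generateClearDungeon width height out) := by unfold Spec_generateClearDungeon; infer_instance

-- ===== CLAIM (what is proved, stated in full; the proofs are below) =====
def Claim_equal_generateClearDungeon : Prop := ∀ (width : Int) (height : Int), Dom_generateClearDungeon width height → Spec_generateClearDungeon width height (generateClearDungeon width height)

-- ===== LEMMAS AND PROOFS =====
theorem pvFrameInner_append_singleton (l : List (List String)) (x : List String) :
    pvFrameInner (l ++ [x]) = l.map pvFrameRow ++ [x] := by
  induction l with
  | nil => rfl
  | cons a l ih =>
    cases l with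
    | nil => rfl
    | cons b l => simpa [pvFrameInner] using ih

-- mapping the table lookup over a kind list [0] + [1]*n + [2]
theorem map_kinds (n : Nat) {α : Type} (f : Nat → α) :
    (0 :: List.replicate n 1 ++ [2]).map f = f 0 :: List.replicate n (f 1) ++ [f 2] := by
  simp [List.map_replicate]

-- ===== VERDICT (by name: the statement is the Claim_ definition above) =====
theorem generateClearDungeon_spec : Claim_equal_generateClearDungeon := by
  intro width height _
  unfold Spec_generateClearDungeon generateClearDungeon generateClearDungeon_alt
  simp only
  rw [pvFrameInner_append_singleton, List.map_replicate]
  simp [map_kinds, pvTbl, pvFrameRow, List.map_replicate, List.range_succ]
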